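-- pv_equiv track=rewrite | github.com/volcengine/verl | atropos/environments/intern_bootcamp/internbootcamp_lib/internbootcamp/bootcamp/ddivideandsummarize/ddivideandsummarize.py | compute_possible_sums
-- ===== SOURCE A (Python) =====
-- import bisect
--
-- def compute_possible_sums(a):
--     if not a:
--         return set()
--     sorted_a = sorted(a)
--     n = len(sorted_a)
--     prefix = [0] * n
--     prefix[0] = sorted_a[0]
--     for i in range(1, n):
--         prefix[i] = sorted_a[i] + prefix[i-1]
--     possible_sums = {prefix[-1]}
--     queue = [(0, n-1)]
--     while queue:
--         next_queue = []
--         for left, right in queue: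
--             if left >= right:
--                 continue
--             current_min = sorted_a[left]
--             current_max = sorted_a[right]
--             mid = (current_min + current_max) // 2
--             j = bisect.bisect_right(sorted_a, mid, left, right + 1)
--             # Left sum calculation
--             if j > left:
--                 sum_left = prefix[j-1] - (prefix[left-1] if left > 0 else 0)
--                 possible_sums.add(sum_left)
--                 next_queue.append((left, j-1))
--             # Right sum calculation
--             if j <= right:
--                 sum_right = prefix[right] - (prefix[j-1] if j > 0 else 0)
--                 possible_sums.add(sum_right)
--                 next_queue.append((j, right))
--         queue = next_queue
--     return possible_sums
-- ===== SOURCE B (Python) =====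
-- def compute_possible_sums(a):
--     if not a:
--         return set()
--     total = sum(a)
--     result = {total}
--     # FIFO of (segment of sorted values, its sum): no index arithmetic, no
--     # prefix array, no binary search -- split by one linear scan per segment.
--     work = [(sorted(a), total)]
--     while work:
--         seg, tot = work.pop(0)
--         if len(seg) < 2:
--             continue
--         mid = (seg[0] + seg[-1]) // 2
--         k = 0
--         left_sum = 0
--         while k < len(seg) and seg[k] <= mid:
--             left_sum += seg[k]
--             k += 1
--         result.add(left_sum)
--         result.add(tot - left_sum)
--         work.append((seg[:k], left_sum))
--         work.append((seg[k:], tot - left_sum))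
--     return result
-- ===== Notes on version B (the rewrite author's own statement) =====
-- stated objective: alternative
-- what changed: Replaced A's index-pair BFS over a prefix-sum array with bisect by a FIFO of explicit value segments each carrying its own running total: a segment is split by one linear scan that accumulates the left part's sum as it goes (the right part's sum is total minus it), so the prefix array, the binary search and all index/boundary arithmetic disappear; Pre_ excludes lists with duplicate elements, on which A never returns (it re-enqueues an all-equal segment forever).
import Mathlib
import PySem

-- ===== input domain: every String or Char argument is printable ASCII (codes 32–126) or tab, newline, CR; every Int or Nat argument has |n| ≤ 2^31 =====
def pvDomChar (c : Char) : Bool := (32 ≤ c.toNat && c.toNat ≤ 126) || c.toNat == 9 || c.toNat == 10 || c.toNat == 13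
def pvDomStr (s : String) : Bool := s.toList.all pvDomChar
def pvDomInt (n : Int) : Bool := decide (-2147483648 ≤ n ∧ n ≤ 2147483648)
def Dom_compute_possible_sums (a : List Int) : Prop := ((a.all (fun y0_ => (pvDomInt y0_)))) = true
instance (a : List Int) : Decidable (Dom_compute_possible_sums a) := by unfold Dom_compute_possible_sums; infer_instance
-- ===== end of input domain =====

-- B replaces A's index-pair BFS over a prefix-sum array with bisect by a FIFO of explicit
-- value segments carrying their own totals, split by a linear scan (objective: alternative).


-- ===== PORT A =====
-- A's prefix scan 'prefix[i] = s[i] + prefix[i-1]' seeded with s[0]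
def pvScan (c : Int) : List Int → List Int
  | [] => [c]
  | x :: xs => c :: pvScan (c + x) xs

-- A's two lines 'mid = (s[l] + s[r]) // 2; j = bisect.bisect_right(s, mid, l, r+1)'.
-- bisectRightLoop is PySem's fuelled bisect with lo/hi bounds (fuel s.length is ample:
-- the search interval halves each step). Indices are Nat: under Pre_ all of Python's
-- index arithmetic here is ≥ 0.
def pvJ (s : List Int) (l r : Nat) : Nat :=
  PySem.List.bisectRightLoop s (PySem.Int.floordiv (s.getD l 0 + s.getD r 0) 2) s.length l (r + 1)

-- the body of A's 'for left, right in queue' loop; state = (possible_sums, next_queue)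
def pvStepA (s pre : List Int) (st : PySem.Set Int × List (Nat × Nat)) (p : Nat × Nat) :
    PySem.Set Int × List (Nat × Nat) :=
  if p.2 ≤ p.1 then st
  else
    let j := pvJ s p.1 p.2
    let st1 :=
      if p.1 < j then
        (PySem.Set.add st.1 (pre.getD (j - 1) 0 - (if 0 < p.1 then pre.getD (p.1 - 1) 0 else 0)),
         st.2 ++ [(p.1, j - 1)])
      else st
    if j ≤ p.2 then
      (PySem.Set.add st1.1 (pre.getD p.2 0 - (if 0 < j then pre.getD (j - 1) 0 else 0)),
       st1.2 ++ [(j, p.2)])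
    else st1

-- A's 'while queue' loop over levels; fuel only makes it total (never exhausted under Pre_)
def pvGoA (s pre : List Int) : Nat → List (Nat × Nat) → PySem.Set Int → PySem.Set Int
  | _, [], ps => ps
  | 0, _ :: _, ps => ps
  | f + 1, q@(_ :: _), ps =>
      let st := q.foldl (pvStepA s pre) (ps, [])
      pvGoA s pre f st.2 st.1

def compute_possible_sums (a : List Int) : List Int :=
  if a = [] then [] else
  let s := PySem.List.sorted a (fun x => x) false
  let n := s.length
  let pre := match s with | [] => [] | x :: xs => pvScan x xs
  let ps : PySem.Set Int := PySem.Set.add PySem.Set.empty (PySem.List.pyGetD pre (-1) 0)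
  pvGoA s pre (2 * n + 1) [(0, n - 1)] ps

-- ===== PORT B =====
-- B's inner 'while k < len(seg) and seg[k] <= mid' loop: k only ever increments, so the
-- scan walks the list structurally carrying (k, left_sum); exact transcription.
def pvPartLoop (mid : Int) : List Int → Nat → Int → Nat × Int
  | [], k, s => (k, s)
  | x :: xs, k, s => if x ≤ mid then pvPartLoop mid xs (k + 1) (s + x) else (k, s)

-- B's 'while work: seg, tot = work.pop(0)' FIFO; fuel only makes it total (never
-- exhausted under Pre_). seg[0]/seg[-1] are read under 'len(seg) >= 2', and seg[:k],
-- seg[k:] with 0 ≤ k, so getD / take / drop are exact here.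
def pvGoB : Nat → List (List Int × Int) → PySem.Set Int → PySem.Set Int
  | 0, _, ps => ps
  | _ + 1, [], ps => ps
  | f + 1, (seg, tot) :: rest, ps =>
      if seg.length < 2 then pvGoB f rest ps
      else
        let mid := PySem.Int.floordiv (seg.getD 0 0 + seg.getD (seg.length - 1) 0) 2
        let kls := pvPartLoop mid seg 0 0
        pvGoB f (rest ++ [(seg.take kls.1, kls.2), (seg.drop kls.1, tot - kls.2)])
          (PySem.Set.add (PySem.Set.add ps kls.2) (tot - kls.2))

def compute_possible_sums_alt (a : List Int) : List Int :=
  if a = [] then [] else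
  let total := a.foldl (· + ·) 0
  let n := a.length
  pvGoB (2 * n + 1) [(PySem.List.sorted a (fun x => x) false, total)]
    (PySem.Set.add PySem.Set.empty total)

-- ===== PRECONDITION & SPEC =====
-- Pre_ excludes lists with duplicate elements: on those A never returns — once the
-- recursion isolates a segment of ≥ 2 equal values, mid = max, bisect_right returns
-- right+1 and (left, right) is re-enqueued unchanged forever (an infinite loop).
def Pre_compute_possible_sums (a : List Int) : Prop := a.Nodup
instance (a : List Int) : Decidable (Pre_compute_possible_sums a) := by
  unfold Pre_compute_possible_sums; infer_instance
def pvWitness_compute_possible_sums : List Int := [2, 0, 1]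

def Spec_compute_possible_sums (a : List Int) (out : List Int) : Prop := out = compute_possible_sums_alt a
instance (a : List Int) (out : List Int) : Decidable (Spec_compute_possible_sums a out) := by unfold Spec_compute_possible_sums; infer_instance

-- ===== CLAIM (what is proved, stated in full; the proofs are below) =====
def Claim_equal_compute_possible_sums : Prop := ∀ (a : List Int), Dom_compute_possible_sums a → Pre_compute_possible_sums a → Spec_compute_possible_sums a (compute_possible_sums a)

-- ===== LEMMAS AND PROOFS =====

-- A FIFO work-list on INDEX PAIRS with the sentinel-0 prefix: the proof's stepping stone
-- between A's level BFS (pvGoA) and B's segment FIFO (pvGoB).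
def pvFifo (s pre : List Int) : Nat → List (Nat × Nat) → PySem.Set Int → PySem.Set Int
  | 0, _, ps => ps
  | _ + 1, [], ps => ps
  | f + 1, (l, r) :: rest, ps =>
      if r ≤ l then pvFifo s pre f rest ps
      else
        let j := pvJ s l r
        pvFifo s pre f (rest ++ [(l, j - 1), (j, r)])
          (PySem.Set.add (PySem.Set.add ps (pre.getD j 0 - pre.getD l 0))
            (pre.getD (r + 1) 0 - pre.getD j 0))

-- bounds for PySem's fuelled bisect loop
lemma pv_brl_ge (xs : List Int) (x : Int) :
    ∀ (f lo hi : Nat), lo ≤ PySem.List.bisectRightLoop xs x f lo hi := by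
  intro f
  induction f with
  | zero => intro lo hi; simp [PySem.List.bisectRightLoop]
  | succ f ih =>
      intro lo hi
      rw [PySem.List.bisectRightLoop]
      split
      · rename_i h
        cases hm : xs[(lo + hi) / 2]? with
        | none => simp
        | some y =>
            simp only
            split
            · exact ih lo ((lo + hi) / 2)
            · exact le_trans (by omega) (ih ((lo + hi) / 2 + 1) hi)
      · simp

lemma pv_brl_le (xs : List Int) (x : Int) :
    ∀ (f lo hi : Nat), lo ≤ hi → PySem.List.bisectRightLoop xs x f lo hi ≤ hi := by
  intro f
  induction f with
  | zero => intro lo hi h; simpa [PySem.List.bisectRightLoop]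
  | succ f ih =>
      intro lo hi h
      rw [PySem.List.bisectRightLoop]
      split
      · rename_i hlt
        cases hm : xs[(lo + hi) / 2]? with
        | none => simpa
        | some y =>
            simp only
            split
            · exact le_trans (ih lo ((lo + hi) / 2) (by omega)) (by omega)
            · exact ih ((lo + hi) / 2 + 1) hi (by omega)
      · simpa

lemma pv_getD_eq (xs : List Int) (i : Nat) (h : i < xs.length) : xs.getD i 0 = xs[i] := by
  rw [List.getD_eq_getElem?_getD, List.getElem?_eq_getElem h]; rfl

-- monotonicity of a strictly sorted list, in getD form
lemma pv_mono (xs : List Int) (hS : xs.Pairwise (· < ·)) (i j : Nat) (hij : i ≤ j)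
    (hj : j < xs.length) : xs.getD i 0 ≤ xs.getD j 0 := by
  rw [pv_getD_eq xs i (by omega), pv_getD_eq xs j hj]
  rcases Nat.lt_or_ge i j with h | h
  · exact le_of_lt (List.pairwise_iff_getElem.mp hS i j (by omega) hj h)
  · have : i = j := by omega
    subst this; exact le_refl _

-- full characterization of the bisect loop on a strictly sorted list
lemma pv_brl_char (xs : List Int) (hS : xs.Pairwise (· < ·)) (x : Int) :
    ∀ (f lo hi : Nat), lo ≤ hi → hi ≤ xs.length → hi - lo ≤ f →
      (∀ i, lo ≤ i → i < PySem.List.bisectRightLoop xs x f lo hi → xs.getD i 0 ≤ x) ∧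
      (∀ i, PySem.List.bisectRightLoop xs x f lo hi ≤ i → i < hi → x < xs.getD i 0) := by
  intro f
  induction f with
  | zero =>
      intro lo hi h1 h2 h3
      constructor
      · intro i hi1 hi2; simp [PySem.List.bisectRightLoop] at hi2; omega
      · intro i hi1 hi2
        simp [PySem.List.bisectRightLoop] at hi1; omega
  | succ f ih =>
      intro lo hi h1 h2 h3
      rw [PySem.List.bisectRightLoop]
      by_cases hlt : lo < hi
      · have hm : (lo + hi) / 2 < xs.length := by omega
        simp only [hlt, if_true, List.getElem?_eq_getElem hm]
        by_cases hxy : x < xs[(lo + hi) / 2]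
        · simp only [hxy, if_true]
          obtain ⟨ihA, ihB⟩ := ih lo ((lo + hi) / 2) (by omega) (by omega) (by omega)
          refine ⟨ihA, ?_⟩
          intro i hi1 hi2
          rcases Nat.lt_or_ge i ((lo + hi) / 2) with h | h
          · exact ihB i hi1 h
          · calc x < xs[(lo + hi) / 2] := hxy
              _ = xs.getD ((lo + hi) / 2) 0 := (pv_getD_eq xs _ hm).symm
              _ ≤ xs.getD i 0 := pv_mono xs hS _ i h (by omega)
        · simp only [hxy, if_false]
          obtain ⟨ihA, ihB⟩ := ih ((lo + hi) / 2 + 1) hi (by omega) h2 (by omega)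
          refine ⟨?_, ihB⟩
          intro i hi1 hi2
          rcases Nat.lt_or_ge i ((lo + hi) / 2 + 1) with h | h
          · calc xs.getD i 0 ≤ xs.getD ((lo + hi) / 2) 0 := pv_mono xs hS i _ (by omega) hm
              _ = xs[(lo + hi) / 2] := pv_getD_eq xs _ hm
              _ ≤ x := not_lt.mp hxy
          · exact ihA i h hi2
      · simp only [hlt, if_false]
        exact ⟨fun i hi1 hi2 => absurd (by omega : lo < hi) hlt,
               fun i hi1 hi2 => absurd (by omega : lo < hi) hlt⟩

-- two indices with the bisect sandwich property coincide
lemma pv_uniq (xs : List Int) (x : Int) (lo hi j1 j2 : Nat)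
    (hb1 : lo ≤ j1) (hb1' : j1 ≤ hi) (hb2 : lo ≤ j2) (hb2' : j2 ≤ hi)
    (h1a : ∀ i, lo ≤ i → i < j1 → xs.getD i 0 ≤ x)
    (h1b : ∀ i, j1 ≤ i → i < hi → x < xs.getD i 0)
    (h2a : ∀ i, lo ≤ i → i < j2 → xs.getD i 0 ≤ x)
    (h2b : ∀ i, j2 ≤ i → i < hi → x < xs.getD i 0) : j1 = j2 := by
  rcases Nat.lt_trichotomy j1 j2 with h | h | h
  · have := h2a j1 hb1 h
    have := h1b j1 (le_refl _) (by omega)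
    omega
  · exact h
  · have := h1a j2 hb2 h
    have := h2b j2 (le_refl _) (by omega)
    omega

-- on a strictly increasing list, the split index lands strictly inside (l, r]
lemma pv_j_bounds (s : List Int) (hS : s.Pairwise (· < ·)) (l r : Nat)
    (hlr : l < r) (hr : r < s.length) : l < pvJ s l r ∧ pvJ s l r ≤ r := by
  have hval : s.getD l 0 < s.getD r 0 := by
    rw [pv_getD_eq s l (by omega), pv_getD_eq s r hr]
    exact List.pairwise_iff_getElem.mp hS l r (by omega) hr hlr
  have hmid₁ : s.getD l 0 ≤ PySem.Int.floordiv (s.getD l 0 + s.getD r 0) 2 :=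
    (PySem.Int.floordiv_two_mid_bounds (le_of_lt hval)).1
  have hmid₂ : PySem.Int.floordiv (s.getD l 0 + s.getD r 0) 2 < s.getD r 0 := by
    rw [PySem.Int.floordiv_lt_iff_lt_mul (by omega)]; omega
  obtain ⟨hA, hB⟩ := pv_brl_char s hS (PySem.Int.floordiv (s.getD l 0 + s.getD r 0) 2)
    s.length l (r + 1) (by omega) (by omega) (by omega)
  constructor
  · by_contra h
    have hle : pvJ s l r ≤ l := by omega
    have := hB l hle (by omega)
    omega
  · by_contra h
    have hrj : r < pvJ s l r := by omega
    have := hA r (by omega) hrj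
    omega

-- the for-body touches its two state components independently
lemma pv_stepA_snd (s pre : List Int) (ps : PySem.Set Int) (nq : List (Nat × Nat))
    (p : Nat × Nat) :
    pvStepA s pre (ps, nq) p
      = ((pvStepA s pre (ps, []) p).1, nq ++ (pvStepA s pre (ps, []) p).2) := by
  unfold pvStepA
  by_cases h1 : p.2 ≤ p.1 <;> by_cases h2 : p.1 < pvJ s p.1 p.2 <;>
    by_cases h3 : pvJ s p.1 p.2 ≤ p.2 <;> simp [h1, h2, h3]

lemma pv_fold_snd (s pre : List Int) :
    ∀ (q : List (Nat × Nat)) (ps : PySem.Set Int) (nq : List (Nat × Nat)),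
      q.foldl (pvStepA s pre) (ps, nq)
        = ((q.foldl (pvStepA s pre) (ps, [])).1, nq ++ (q.foldl (pvStepA s pre) (ps, [])).2) := by
  intro q
  induction q with
  | nil => intro ps nq; simp
  | cons h t ih =>
      intro ps nq
      simp only [List.foldl_cons]
      rw [pv_stepA_snd s pre ps nq h, ih _ (nq ++ _), pv_stepA_snd s pre ps [] h,
        ih _ ([] ++ _)]
      simp

lemma pv_stepA_skip (s pre : List Int) (ps : PySem.Set Int) (nq : List (Nat × Nat))
    (l r : Nat) (h : r ≤ l) : pvStepA s pre (ps, nq) (l, r) = (ps, nq) := by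
  simp [pvStepA, h]

lemma pv_stepA_split (s pre : List Int) (ps : PySem.Set Int) (nq : List (Nat × Nat))
    (l r : Nat) (hlj : l < pvJ s l r) (hjr : pvJ s l r ≤ r) (hlr : l < r) :
    pvStepA s pre (ps, nq) (l, r)
      = (PySem.Set.add
          (PySem.Set.add ps
            (pre.getD (pvJ s l r - 1) 0 - (if 0 < l then pre.getD (l - 1) 0 else 0)))
          (pre.getD r 0 - (if 0 < pvJ s l r then pre.getD (pvJ s l r - 1) 0 else 0)),
         nq ++ [(l, pvJ s l r - 1), (pvJ s l r, r)]) := by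
  unfold pvStepA
  simp only [show ¬ r ≤ l by omega, if_false, hlj, if_true, hjr]
  simp

-- sentinel-0 prefix versus A's guarded prefix: one unconditional subtraction each
lemma pv_sum_eq (L : List Int) (j l : Nat) (hj : 1 ≤ j) :
    (0 :: L).getD j 0 - (0 :: L).getD l 0
      = L.getD (j - 1) 0 - (if 0 < l then L.getD (l - 1) 0 else 0) := by
  obtain ⟨j', rfl⟩ : ∃ j', j = j' + 1 := ⟨j - 1, by omega⟩
  cases l <;> simp [List.getD]

lemma pv_scan_len (xs : List Int) : ∀ (c : Int), (pvScan c xs).length = xs.length + 1 := by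
  induction xs with
  | nil => intro c; simp [pvScan]
  | cons x t ih => intro c; simp [pvScan, ih]

-- FIFO processing of a whole batch = one BFS level of A
lemma pv_fifo_skip (s pre : List Int) (f : Nat) (l r : Nat) (rest : List (Nat × Nat))
    (ps : PySem.Set Int) (h : r ≤ l) :
    pvFifo s pre (f + 1) ((l, r) :: rest) ps = pvFifo s pre f rest ps := by
  simp [pvFifo, h]

lemma pv_fifo_split (s pre : List Int) (f : Nat) (l r : Nat) (rest : List (Nat × Nat))
    (ps : PySem.Set Int) (h : ¬ r ≤ l) :
    pvFifo s pre (f + 1) ((l, r) :: rest) ps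
      = pvFifo s pre f (rest ++ [(l, pvJ s l r - 1), (pvJ s l r, r)])
          (PySem.Set.add (PySem.Set.add ps (pre.getD (pvJ s l r) 0 - pre.getD l 0))
            (pre.getD (r + 1) 0 - pre.getD (pvJ s l r) 0)) := by
  simp [pvFifo, h]

lemma pv_fifo_batch (s pre0 : List Int) (hS : s.Pairwise (· < ·)) :
    ∀ (q k : List (Nat × Nat)) (ps : PySem.Set Int) (f : Nat),
      (∀ p ∈ q, p.2 < s.length) →
      pvFifo s (0 :: pre0) (q.length + f) (q ++ k) ps
        = pvFifo s (0 :: pre0) f (k ++ (q.foldl (pvStepA s pre0) (ps, [])).2)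
            (q.foldl (pvStepA s pre0) (ps, [])).1 := by
  intro q
  induction q with
  | nil => intro k ps f hq; simp
  | cons h t ih =>
      intro k ps f hq
      obtain ⟨l, r⟩ := h
      have hr : r < s.length := hq (l, r) (by simp)
      have hq' : ∀ p ∈ t, p.2 < s.length := fun p hp => hq p (by simp [hp])
      have hlen : ((l, r) :: t).length + f = (t.length + f) + 1 := by simp; omega
      by_cases hlr : r ≤ l
      · rw [hlen, List.cons_append, pv_fifo_skip s (0 :: pre0) (t.length + f) l r (t ++ k) ps hlr,
          ih k ps f hq']
        simp only [List.foldl_cons, pv_stepA_skip s pre0 ps [] l r hlr]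
      · obtain ⟨hlj, hjr⟩ := pv_j_bounds s hS l r (by omega) hr
        rw [hlen, List.cons_append, pv_fifo_split s (0 :: pre0) (t.length + f) l r (t ++ k) ps hlr,
          List.append_assoc, ih (k ++ [(l, pvJ s l r - 1), (pvJ s l r, r)]) _ f hq']
        have hSL : (0 :: pre0).getD (pvJ s l r) 0 - (0 :: pre0).getD l 0
            = pre0.getD (pvJ s l r - 1) 0 - (if 0 < l then pre0.getD (l - 1) 0 else 0) :=
          pv_sum_eq pre0 (pvJ s l r) l (by omega)
        have hSR : (0 :: pre0).getD (r + 1) 0 - (0 :: pre0).getD (pvJ s l r) 0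
            = pre0.getD r 0 - (if 0 < pvJ s l r then pre0.getD (pvJ s l r - 1) 0 else 0) :=
          pv_sum_eq pre0 (r + 1) (pvJ s l r) (by omega)
        rw [hSL, hSR]
        simp only [List.foldl_cons,
          pv_stepA_split s pre0 ps [] l r hlj hjr (by omega), List.nil_append]
        rw [pv_fold_snd s pre0 t _ [(l, pvJ s l r - 1), (pvJ s l r, r)]]
        simp

-- measure and interval invariant
def pvMu (q : List (Nat × Nat)) : Nat := (q.map (fun p => 2 * (p.2 - p.1) + 1)).sum

lemma pv_len_le_mu (q : List (Nat × Nat)) : q.length ≤ pvMu q := by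
  induction q with
  | nil => simp [pvMu]
  | cons h t ih => simp only [pvMu, List.map_cons, List.sum_cons, List.length_cons]; unfold pvMu at ih; omega

lemma pv_mu_append (q k : List (Nat × Nat)) : pvMu (q ++ k) = pvMu q + pvMu k := by
  simp [pvMu]

lemma pv_children (s pre0 : List Int) (hS : s.Pairwise (· < ·)) :
    ∀ (q : List (Nat × Nat)) (ps : PySem.Set Int),
      (∀ p ∈ q, p.2 < s.length) →
      (∀ p ∈ (q.foldl (pvStepA s pre0) (ps, [])).2, p.2 < s.length) ∧
        pvMu (q.foldl (pvStepA s pre0) (ps, [])).2 + q.length ≤ pvMu q := by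
  intro q
  induction q with
  | nil => intro ps hq; simp [pvMu]
  | cons h t ih =>
      intro ps hq
      obtain ⟨l, r⟩ := h
      have hr : r < s.length := hq (l, r) (by simp)
      have hq' : ∀ p ∈ t, p.2 < s.length := fun p hp => hq p (by simp [hp])
      have hmuc : pvMu ((l, r) :: t) = (2 * (r - l) + 1) + pvMu t := by simp [pvMu]
      by_cases hlr : r ≤ l
      · simp only [List.foldl_cons, pv_stepA_skip s pre0 ps [] l r hlr]
        obtain ⟨ih1, ih2⟩ := ih ps hq'
        exact ⟨ih1, by simp only [List.length_cons]; omega⟩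
      · obtain ⟨hlj, hjr⟩ := pv_j_bounds s hS l r (by omega) hr
        simp only [List.foldl_cons,
          pv_stepA_split s pre0 ps [] l r hlj hjr (by omega), List.nil_append]
        rw [pv_fold_snd s pre0 t _ [(l, pvJ s l r - 1), (pvJ s l r, r)]]
        obtain ⟨ih1, ih2⟩ := ih (PySem.Set.add
          (PySem.Set.add ps
            (pre0.getD (pvJ s l r - 1) 0 - (if 0 < l then pre0.getD (l - 1) 0 else 0)))
          (pre0.getD r 0 - (if 0 < pvJ s l r then pre0.getD (pvJ s l r - 1) 0 else 0))) hq'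
        constructor
        · intro p hp
          simp only [List.mem_append, List.mem_cons] at hp
          rcases hp with (rfl | rfl | h) | hp
          · simp; omega
          · simpa using hr
          · simp at h
          · exact ih1 p hp
        · rw [pv_mu_append]
          have hmu2 : pvMu [(l, pvJ s l r - 1), (pvJ s l r, r)] = 2 * (r - l) := by
            simp [pvMu]; omega
          simp only [List.length_cons] at ih2 ⊢
          omega

lemma pv_goA_nil (s pre : List Int) (f : Nat) (ps : PySem.Set Int) :
    pvGoA s pre f [] ps = ps := by cases f <;> rfl

lemma pv_fifo_nil (s pre : List Int) (f : Nat) (ps : PySem.Set Int) :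
    pvFifo s pre f [] ps = ps := by cases f <;> rfl

lemma pv_goA_cons (s pre : List Int) (f : Nat) (q : List (Nat × Nat))
    (ps : PySem.Set Int) (hq : q ≠ []) :
    pvGoA s pre (f + 1) q ps
      = pvGoA s pre f (q.foldl (pvStepA s pre) (ps, [])).2 (q.foldl (pvStepA s pre) (ps, [])).1 := by
  cases q with
  | nil => exact absurd rfl hq
  | cons h t => rfl

-- A's level BFS = the index-pair FIFO
lemma pv_main (s pre0 : List Int) (hS : s.Pairwise (· < ·)) :
    ∀ (fa fb : Nat) (q : List (Nat × Nat)) (ps : PySem.Set Int),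
      (∀ p ∈ q, p.2 < s.length) → pvMu q ≤ fa → pvMu q ≤ fb →
      pvGoA s pre0 fa q ps = pvFifo s (0 :: pre0) fb q ps := by
  intro fa
  induction fa with
  | zero =>
      intro fb q ps hq ha hb
      have hl := pv_len_le_mu q
      have hq0 : q = [] := by
        cases q with
        | nil => rfl
        | cons h t => exfalso; simp at hl; omega
      subst hq0; rw [pv_goA_nil, pv_fifo_nil]
  | succ fa ih =>
      intro fb q ps hq ha hb
      cases q with
      | nil => rw [pv_goA_nil, pv_fifo_nil]
      | cons h t =>
          have hlen := pv_len_le_mu (h :: t)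
          obtain ⟨hc1, hc2⟩ := pv_children s pre0 hS (h :: t) ps hq
          rw [pv_goA_cons s pre0 fa (h :: t) ps (by simp)]
          have hfb : (h :: t).length + (fb - (h :: t).length) = fb := by
            simp only [List.length_cons] at hlen ⊢; omega
          have hbatch := pv_fifo_batch s pre0 hS (h :: t) [] ps (fb - (h :: t).length) hq
          rw [hfb, List.append_nil, List.nil_append] at hbatch
          rw [hbatch]
          exact ih (fb - (h :: t).length) _ _ hc1
            (by simp only [List.length_cons] at hc2 ⊢; omega)
            (by simp only [List.length_cons] at hc2 hlen ⊢; omega)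

-- ---- B side: the linear partition scan and the queue correspondence ----

lemma pv_partLoop_tw (mid : Int) :
    ∀ (t : List Int) (k0 : Nat) (s0 : Int),
      pvPartLoop mid t k0 s0
        = (k0 + (t.takeWhile (fun v => decide (v ≤ mid))).length,
           s0 + (t.takeWhile (fun v => decide (v ≤ mid))).sum) := by
  intro t
  induction t with
  | nil => intro k0 s0; simp [pvPartLoop]
  | cons x xs ih =>
      intro k0 s0
      by_cases hx : x ≤ mid
      · have htw : (x :: xs).takeWhile (fun v => decide (v ≤ mid))
            = x :: xs.takeWhile (fun v => decide (v ≤ mid)) := by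
          simp [hx]
        rw [htw]
        simp only [pvPartLoop, if_pos hx, ih, List.length_cons, List.sum_cons, Prod.mk.injEq]
        constructor
        · omega
        · ring
      · have htw : (x :: xs).takeWhile (fun v => decide (v ≤ mid)) = [] := by
          simp [hx]
        rw [htw]
        simp [pvPartLoop, hx]

lemma pv_tw_take {α : Type} (p : α → Bool) :
    ∀ (t : List α), t.takeWhile p = t.take (t.takeWhile p).length := by
  intro t
  induction t with
  | nil => simp
  | cons x xs ih =>
      by_cases hx : p x
      · simp [hx, List.take_succ_cons, ← ih]
      · simp [hx]

lemma pv_tw_spec (mid : Int) :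
    ∀ (t : List Int),
      (t.takeWhile (fun v => decide (v ≤ mid))).length ≤ t.length ∧
      (∀ i, i < (t.takeWhile (fun v => decide (v ≤ mid))).length → t.getD i 0 ≤ mid) ∧
      ((t.takeWhile (fun v => decide (v ≤ mid))).length < t.length →
        mid < t.getD (t.takeWhile (fun v => decide (v ≤ mid))).length 0) := by
  intro t
  induction t with
  | nil => simp
  | cons x xs ih =>
      obtain ⟨ih1, ih2, ih3⟩ := ih
      by_cases hx : x ≤ mid
      · simp only [List.takeWhile_cons, decide_eq_true hx, List.length_cons]
        refine ⟨by simpa using ih1, ?_, ?_⟩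
        · intro i hi
          cases i with
          | zero => simpa [List.getD] using hx
          | succ i => simpa [List.getD] using ih2 i (by simpa using hi)
        · intro h
          simpa [List.getD] using ih3 (by simpa using h)
      · simp only [List.takeWhile_cons, decide_eq_false hx]
        exact ⟨by simp, by simp, fun _ => by simpa [List.getD] using not_le.mp hx⟩

-- the segment of s between indices l and r (inclusive), element-wise
lemma pv_seg_getD (s : List Int) (l r i : Nat) (hi : i < r + 1 - l) (hr : r < s.length) :
    ((s.drop l).take (r + 1 - l)).getD i 0 = s.getD (l + i) 0 := by
  have h1 : i < ((s.drop l).take (r + 1 - l)).length := by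
    simp only [List.length_take, List.length_drop]; omega
  rw [pv_getD_eq _ i h1, pv_getD_eq s (l + i) (by omega)]
  simp [List.getElem_take, List.getElem_drop]

lemma pv_seg_len (s : List Int) (l r : Nat) (hl : l ≤ r) (hr : r < s.length) :
    ((s.drop l).take (r + 1 - l)).length = r + 1 - l := by
  simp only [List.length_take, List.length_drop]; omega

-- the linear scan finds exactly A's bisect index
lemma pv_k_eq (s : List Int) (hS : s.Pairwise (· < ·)) (l r : Nat) (hlr : l < r)
    (hr : r < s.length) :
    pvJ s l r
      = l + (((s.drop l).take (r + 1 - l)).takeWhile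
          (fun v => decide (v ≤ PySem.Int.floordiv (s.getD l 0 + s.getD r 0) 2))).length := by
  set mid := PySem.Int.floordiv (s.getD l 0 + s.getD r 0) 2 with hmid
  set seg := (s.drop l).take (r + 1 - l) with hseg
  set k := (seg.takeWhile (fun v => decide (v ≤ mid))).length with hk
  have hslen : seg.length = r + 1 - l := pv_seg_len s l r (by omega) hr
  obtain ⟨htw1, htw2, htw3⟩ := pv_tw_spec mid seg
  obtain ⟨hA, hB⟩ := pv_brl_char s hS mid s.length l (r + 1) (by omega) (by omega) (by omega)
  have hge := pv_brl_ge s mid s.length l (r + 1)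
  have hle := pv_brl_le s mid s.length l (r + 1) (by omega)
  refine pv_uniq s mid l (r + 1) (pvJ s l r) (l + k) hge hle (by omega) (by omega)
    hA hB ?_ ?_
  · intro i hi1 hi2
    have hik : i - l < k := by omega
    have := htw2 (i - l) hik
    rw [pv_seg_getD s l r (i - l) (by omega) hr] at this
    have hli : l + (i - l) = i := by omega
    rwa [hli] at this
  · intro i hi1 hi2
    rcases Nat.lt_or_ge k seg.length with hklt | hkge
    · have hmk := htw3 (by omega)
      rw [pv_seg_getD s l r k (by omega) hr] at hmk
      calc mid < s.getD (l + k) 0 := hmk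
        _ ≤ s.getD i 0 := pv_mono s hS (l + k) i (by omega) (by omega)
    · omega

-- queue correspondence: an index pair and a (segment, total) work item describe
-- the same piece of the sorted list
def pvGood (s : List Int) (p : Nat × Nat) (w : List Int × Int) : Prop :=
  p.1 ≤ p.2 ∧ p.2 < s.length ∧ w.1 = (s.drop p.1).take (p.2 + 1 - p.1) ∧ w.2 = w.1.sum

lemma pv_take_sum (s : List Int) (l j : Nat) (hlj : l ≤ j) :
    (s.take j).sum = (s.take l).sum + ((s.drop l).take (j - l)).sum := by
  have h : s.take j = s.take l ++ (s.drop l).take (j - l) := by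
    rw [← List.take_add]
    congr 1
    omega
  rw [h, List.sum_append]

-- lockstep: the index-pair FIFO and B's segment FIFO agree step by step
lemma pv_lockstep (s pre' : List Int) (hS : s.Pairwise (· < ·))
    (hpre : ∀ i, i ≤ s.length → pre'.getD i 0 = (s.take i).sum) :
    ∀ (f : Nat) (q : List (Nat × Nat)) (w : List (List Int × Int)) (ps : PySem.Set Int),
      List.Forall₂ (pvGood s) q w → pvFifo s pre' f q ps = pvGoB f w ps := by
  intro f
  induction f with
  | zero => intro q w ps hF; rfl
  | succ f ih =>
      intro q w ps hF
      cases hF with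
      | nil => rfl
      | @cons p wi q' w' hg hF' =>
          obtain ⟨l, r⟩ := p
          obtain ⟨seg, tot⟩ := wi
          obtain ⟨hlr0, hrn, hseg, htot⟩ := hg
          simp only at hlr0 hrn hseg htot
          have hslen : seg.length = r + 1 - l := by
            rw [hseg]; exact pv_seg_len s l r hlr0 hrn
          by_cases hlr : r ≤ l
          · have hlen2 : seg.length < 2 := by omega
            rw [pv_fifo_skip s pre' f l r q' ps hlr]
            show _ = pvGoB (f + 1) ((seg, tot) :: w') ps
            rw [pvGoB, if_pos hlen2]
            exact ih q' w' ps hF'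
          · have hlen2 : ¬ seg.length < 2 := by omega
            obtain ⟨hlj, hjr⟩ := pv_j_bounds s hS l r (by omega) hrn
            -- B's mid equals A's mid
            have hg0 : seg.getD 0 0 = s.getD l 0 := by
              rw [hseg, pv_seg_getD s l r 0 (by omega) hrn, Nat.add_zero]
            have hgl : seg.getD (seg.length - 1) 0 = s.getD r 0 := by
              rw [hslen, hseg, pv_seg_getD s l r (r + 1 - l - 1) (by omega) hrn]
              congr 1
              omega
            set mid := PySem.Int.floordiv (s.getD l 0 + s.getD r 0) 2 with hmid
            set j := pvJ s l r with hj
            set k := (seg.takeWhile (fun v => decide (v ≤ mid))).length with hk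
            have hjk : j = l + k := by
              rw [hj, hk, hseg]
              exact pv_k_eq s hS l r (by omega) hrn
            have htw_take : seg.takeWhile (fun v => decide (v ≤ mid)) = seg.take k :=
              pv_tw_take _ seg
            obtain ⟨htw1, -, -⟩ := pv_tw_spec mid seg
            have hpart : pvPartLoop mid seg 0 0 = (k, (seg.take k).sum) := by
              have h1 := pv_partLoop_tw mid seg 0 0
              rw [htw_take] at h1
              have hlen' : (seg.take k).length = k := by
                simp only [List.length_take]
                omega
              simpa [hlen'] using h1
            -- segment pieces
            have hseg1 : seg.take k = (s.drop l).take (j - l) := by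
              rw [hseg, List.take_take]
              congr 1
              omega
            have hseg2 : seg.drop k = (s.drop j).take (r + 1 - j) := by
              rw [hseg, List.drop_take, List.drop_drop]
              congr 1
              · omega
              · congr 1; omega
            -- sums
            have hls : (seg.take k).sum = pre'.getD j 0 - pre'.getD l 0 := by
              rw [hpre j (by omega), hpre l (by omega), pv_take_sum s l j (by omega), hseg1]
              have hjl : j - l = k := by omega
              rw [hjl]
              ring
            have htot' : tot = pre'.getD (r + 1) 0 - pre'.getD l 0 := by
              rw [htot, hseg, hpre (r + 1) (by omega), hpre l (by omega),
                pv_take_sum s l (r + 1) (by omega)]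
              ring
            have hrs : tot - (seg.take k).sum = pre'.getD (r + 1) 0 - pre'.getD j 0 := by
              rw [hls, htot']; ring
            have hsum2 : tot - (seg.take k).sum = (seg.drop k).sum := by
              have hsplit : (seg.take k).sum + (seg.drop k).sum = seg.sum := by
                rw [← List.sum_append, List.take_append_drop]
              rw [htot]
              omega
            -- one step on each side
            rw [pv_fifo_split s pre' f l r q' ps hlr]
            show _ = pvGoB (f + 1) ((seg, tot) :: w') ps
            rw [pvGoB, if_neg hlen2]
            simp only [← hg0, ← hgl] at hmid
            have hmid' : PySem.Int.floordiv (seg.getD 0 0 + seg.getD (seg.length - 1) 0) 2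
                = mid := by rw [hmid, hg0, hgl]
            simp only [hmid', hpart]
            rw [← hls, ← hrs]
            refine ih (q' ++ [(l, j - 1), (j, r)])
              (w' ++ [(seg.take k, (seg.take k).sum), (seg.drop k, tot - (seg.take k).sum)]) _ ?_
            refine List.rel_append hF' ?_
            refine List.Forall₂.cons ?_ (List.Forall₂.cons ?_ List.Forall₂.nil)
            · have hj1 : j - 1 + 1 - l = j - l := by omega
              have hlj1 : l ≤ j - 1 := by omega
              have hj1n : j - 1 < s.length := by omega
              refine ⟨hlj1, hj1n, ?_, rfl⟩
              rw [hseg1, hj1]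
            · exact ⟨hjr, hrn, by rw [hseg2], by rw [hsum2]⟩

-- prefix values of A's scan, in closed form
lemma pv_scan_getD :
    ∀ (xs : List Int) (c : Int) (i : Nat), i ≤ xs.length →
      (pvScan c xs).getD i 0 = c + (xs.take i).sum := by
  intro xs
  induction xs with
  | nil =>
      intro c i hi
      have hi0 : i = 0 := by simpa using hi
      subst hi0
      simp [pvScan]
  | cons y ys ih =>
      intro c i hi
      cases i with
      | zero => simp [pvScan]
      | succ i =>
          simp only [pvScan, List.getD_cons_succ, List.take_succ_cons, List.sum_cons]
          rw [ih (c + y) i (by simpa using hi)]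
          ring

-- sentinel-0 prefix of the sorted list: pre'[i] = sum of the first i elements
lemma pv_pre' (x : Int) (xs : List Int) (i : Nat) (hi : i ≤ (x :: xs).length) :
    (0 :: pvScan x xs).getD i 0 = ((x :: xs).take i).sum := by
  cases i with
  | zero => simp
  | succ i =>
      simp only [List.getD_cons_succ, List.take_succ_cons, List.sum_cons]
      rw [pv_scan_getD xs x i (by simpa using hi)]

-- strictly increasing: sorted + nodup
lemma pv_sorted_lt (a : List Int) (h : a.Nodup) :
    (PySem.List.sorted a (fun x => x) false).Pairwise (· < ·) := by
  have hperm := PySem.List.sorted_perm a (fun x => x) false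
  have hnd : (PySem.List.sorted a (fun x => x) false).Nodup := hperm.nodup_iff.mpr h
  have hle : (PySem.List.sorted a (fun x => x) false).Pairwise (· ≤ ·) := by
    simpa using PySem.List.sorted_pairwise a (fun x => x)
  exact (hle.and hnd).imp (fun hab => lt_of_le_of_ne hab.1 hab.2)

-- ===== VERDICT (by name: the statement is the Claim_ definition above) =====
theorem compute_possible_sums_spec : Claim_equal_compute_possible_sums := by
  intro a _ hpre
  unfold Spec_compute_possible_sums compute_possible_sums compute_possible_sums_alt
  by_cases ha : a = []
  · simp [ha]
  · simp only [ha, if_false]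
    have hS := pv_sorted_lt a hpre
    have hlen : (PySem.List.sorted a (fun x => x) false).length = a.length :=
      (PySem.List.sorted_perm a (fun x => x) false).length_eq
    have hsum : (PySem.List.sorted a (fun x => x) false).sum = a.sum :=
      (PySem.List.sorted_perm a (fun x => x) false).sum_eq
    have hfold : a.foldl (· + ·) 0 = a.sum := (List.sum_eq_foldl (l := a)).symm
    cases hs : PySem.List.sorted a (fun x => x) false with
    | nil => exact absurd ((PySem.List.sorted_eq_nil_iff a (fun x => x) false).mp hs) ha
    | cons x xs =>
        rw [hs] at hS hlen hsum
        have hmatch : (match x :: xs with | [] => ([] : List Int) | x :: xs => pvScan x xs)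
            = pvScan x xs := rfl
        rw [hmatch]
        have hn : (x :: xs).length = a.length := hlen
        have hscanlen : (pvScan x xs).length = xs.length + 1 := pv_scan_len xs x
        have hLne : pvScan x xs ≠ [] := by
          intro h0; rw [h0] at hscanlen; simp at hscanlen
        -- A's seed prefix[-1] is the sentinel prefix at index n
        have hseedA : PySem.List.pyGetD (pvScan x xs) (-1) 0
            = (0 :: pvScan x xs).getD ((x :: xs).length) 0 := by
          rw [PySem.List.pyGetD_neg_one (pvScan x xs) 0 hLne]
          simp only [List.length_cons, List.getD_cons_succ]
          rw [List.getLast_eq_getElem, ← pv_getD_eq (pvScan x xs) _ (by omega)]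
          rw [hscanlen]
          simp
        have hseedv : (0 :: pvScan x xs).getD ((x :: xs).length) 0 = a.foldl (· + ·) 0 := by
          rw [pv_pre' x xs ((x :: xs).length) (le_refl _), List.take_length, hsum, hfold]
        have hmain := pv_main (x :: xs) (pvScan x xs) hS (2 * (x :: xs).length + 1)
          (2 * (x :: xs).length + 1) [(0, (x :: xs).length - 1)]
          (PySem.Set.add PySem.Set.empty (PySem.List.pyGetD (pvScan x xs) (-1) 0))
          (by intro p hp; simp at hp; simp [hp])
          (by simp [pvMu]) (by simp [pvMu])
        rw [hmain]
        have hlock := pv_lockstep (x :: xs) (0 :: pvScan x xs) hS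
          (fun i hi => pv_pre' x xs i hi)
          (2 * (x :: xs).length + 1) [(0, (x :: xs).length - 1)]
          [(x :: xs, a.foldl (· + ·) 0)]
          (PySem.Set.add PySem.Set.empty (PySem.List.pyGetD (pvScan x xs) (-1) 0))
          (by
            refine List.Forall₂.cons ?_ List.Forall₂.nil
            refine ⟨by simp, by simp, ?_, ?_⟩
            · simp
            · simp only
              rw [hfold, ← hsum])
        rw [hlock, hseedA, hseedv, hn]
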